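-- pv_equiv track=rewrite | github.com/smolnetim/hka-sat-solving-labor | blatt01_aufgabe01/main.py | of_blocks
-- ===== SOURCE A (Python) =====
-- def of_blocks(order):
--     indices = []
--     dimension = order * order
--
--     for n in range(1, dimension + 1):
--         for a in range(order):
--             for b in range(order):
--                 block_indices = []
--                 for col_i in range(order):
--                     for row_j in range(order):
--                         col_offset = a * order
--                         row_offset = b * order
--                         block_indices.append(encode(n, col_i + col_offset, row_j + row_offset, order))
--                 indices.append(block_indices)
--
--     return indices
--
-- def encode(num, col, row, order):
--     dimension = order * order
--     return (col + row * dimension) * dimension + num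
-- ===== SOURCE B (Python) =====
-- def of_blocks(order):
--     dimension = order * order
--     # phase 1: geometry only — the base value of every cell of every block, independent of n
--     bases = []
--     for a in range(order):
--         for b in range(order):
--             bases.append([(col + a * order + (row + b * order) * dimension) * dimension
--                           for col in range(order) for row in range(order)])
--     # phase 2: shift each precomputed base block by n
--     return [[base + n for base in block]
--             for n in range(1, dimension + 1) for block in bases]
-- ===== Notes on version B (the rewrite author's own statement) =====
-- stated objective: alternative
-- what changed: B precomputes the n-independent base blocks in one geometry pass and then builds the output by shifting each precomputed block by n, instead of re-running the four nested geometry loops with encode() for every n.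
import Mathlib
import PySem

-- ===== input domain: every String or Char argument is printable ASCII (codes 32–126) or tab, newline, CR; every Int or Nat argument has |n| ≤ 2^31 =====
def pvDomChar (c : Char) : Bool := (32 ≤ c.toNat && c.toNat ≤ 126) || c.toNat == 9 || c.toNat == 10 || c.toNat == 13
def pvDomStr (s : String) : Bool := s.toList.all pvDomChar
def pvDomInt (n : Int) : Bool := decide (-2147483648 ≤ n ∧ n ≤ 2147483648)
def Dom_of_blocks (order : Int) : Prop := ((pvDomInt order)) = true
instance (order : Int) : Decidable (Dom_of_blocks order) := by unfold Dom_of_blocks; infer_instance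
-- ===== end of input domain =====

-- B separates geometry from the per-n offset: it precomputes the n-independent base
-- blocks once and then shifts each by n, instead of re-running the four nested
-- geometry loops for every n (objective: alternative decomposition, same output).

-- ===== PORT A =====
def encode (num col row order : Int) : Int :=
  let dimension := order * order
  (col + row * dimension) * dimension + num

def of_blocks (order : Int) : List (List Int) :=
  let dimension := order * order
  (PySem.List.pyRange 1 (dimension + 1) 1).foldl (fun indices n =>
    (PySem.List.pyRange 0 order 1).foldl (fun indices a =>
      (PySem.List.pyRange 0 order 1).foldl (fun indices b =>
        let block_indices := (PySem.List.pyRange 0 order 1).foldl (fun bi col_i =>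
          (PySem.List.pyRange 0 order 1).foldl (fun bi row_j =>
            let col_offset := a * order
            let row_offset := b * order
            bi ++ [encode n (col_i + col_offset) (row_j + row_offset) order]) bi) []
        indices ++ [block_indices]) indices) indices) []

-- ===== PORT B =====
def of_blocks_alt (order : Int) : List (List Int) :=
  let dimension := order * order
  let bases := (PySem.List.pyRange 0 order 1).foldl (fun bs a =>
    (PySem.List.pyRange 0 order 1).foldl (fun bs b =>
      bs ++ [(PySem.List.pyRange 0 order 1).flatMap (fun col =>
        (PySem.List.pyRange 0 order 1).map (fun row =>
          (col + a * order + (row + b * order) * dimension) * dimension))]) bs) []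
  (PySem.List.pyRange 1 (dimension + 1) 1).flatMap (fun n =>
    bases.map (fun block => block.map (fun base => base + n)))

-- ===== PRECONDITION & SPEC =====
def Spec_of_blocks (order : Int) (out : List (List Int)) : Prop := out = of_blocks_alt order
instance (order : Int) (out : List (List Int)) : Decidable (Spec_of_blocks order out) := by unfold Spec_of_blocks; infer_instance

-- ===== CLAIM (what is proved, stated in full; the proofs are below) =====
def Claim_equal_of_blocks : Prop := ∀ (order : Int), Dom_of_blocks order → Spec_of_blocks order (of_blocks order)

-- ===== LEMMAS AND PROOFS =====
theorem of_blocks_eq_alt (order : Int) : of_blocks order = of_blocks_alt order := by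
  simp only [of_blocks, of_blocks_alt, encode,
    PySem.List.foldl_append_singleton_eq_map, PySem.List.foldl_append_eq_flatMap,
    List.map_flatMap, List.map_map, List.nil_append, Function.comp_def]

-- ===== VERDICT (by name: the statement is the Claim_ definition above) =====
theorem of_blocks_spec : Claim_equal_of_blocks := by
  intro order _
  exact of_blocks_eq_alt order
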